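-- pv_equiv track=rewrite | github.com/NuBFightForMyDream/2110101-Computer-Programming | 2110101 Grader Problems/Part 05-07 (Grader 02)/Grader 02 Past Paper + 2024 Exam Thonny/2019 - 2023 Grader 02 Past Papers/2023_T2_Q2_G2_01 Rude Words.py | less_offensive
-- ===== SOURCE A (Python) =====
-- def hide_vowel(word) : # w = offensive words (str)
--     # define for output
--     out = ''
--     # for loop -> check if found vowel -> replace with *
--     for char in word :
--         if char.lower() in 'aeiou' :
--             char = '*'
--         # add value to char every time
--         out += char
--     # out of loop -> return out
--     return out
--
-- def less_offensive(text , oword) : # text = all string , oword = word we need to censor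
--     # while loop until last char
--     k = 0
--     # define var.
--     copytext = text # define copytext for changing
--     out_text = ''
--     while k < len(text) :
--         if copytext[k : k+len(oword)].lower() == oword.lower() :
--             # change word we're checking (dont use oword)
--             out_text += hide_vowel(text[k:k+len(oword)])
--             # we've to output original text -> we'll change parameter to word that we're checking
--             k += len(oword) # skip with len(oword) pos.
--         else :
--             out_text += text[k]
--             k += 1
--     # return out_text
--     return out_text
-- ===== SOURCE B (Python) =====
-- def less_offensive(text, oword):
--     # Censor vowels in every case-insensitive, non-overlapping occurrence of oword.
--     # Lowercase both strings once, then jump between occurrences with str.find.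
--     lw = oword.lower()
--     if not lw:
--         return text
--     lt = text.lower()
--     n = len(lw)
--     out = []
--     i = 0
--     while True:
--         j = lt.find(lw, i)
--         if j == -1:
--             out.append(text[i:])
--             break
--         out.append(text[i:j])
--         out.append(''.join('*' if c in 'aeiouAEIOU' else c for c in text[j:j+n]))
--         i = j + n
--     return ''.join(out)
-- ===== Notes on version B (the rewrite author's own statement) =====
-- stated objective: faster
-- what changed: B lowercases text and oword once and jumps directly between occurrences with str.find, instead of A's per-index slice-copy + lower + compare; matched chunks are censored via a comprehension and the pieces are joined at the end instead of repeated string concatenation.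
-- outside the precondition, e.g. on less_offensive('a', ''): A does not finish within the time limit, B returns 'a'
import Mathlib
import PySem

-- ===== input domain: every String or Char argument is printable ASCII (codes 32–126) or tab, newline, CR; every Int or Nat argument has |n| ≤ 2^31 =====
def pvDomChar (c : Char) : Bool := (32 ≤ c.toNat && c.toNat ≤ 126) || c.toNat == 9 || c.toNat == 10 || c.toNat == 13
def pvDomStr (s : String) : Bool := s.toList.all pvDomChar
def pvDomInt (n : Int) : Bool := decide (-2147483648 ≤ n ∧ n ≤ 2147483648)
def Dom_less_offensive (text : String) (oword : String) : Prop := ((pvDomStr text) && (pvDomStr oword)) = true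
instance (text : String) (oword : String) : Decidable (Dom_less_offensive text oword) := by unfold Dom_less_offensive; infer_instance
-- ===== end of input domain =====

-- B lowercases both strings once and jumps between case-insensitive occurrences with str.find
-- instead of re-lowercasing a text slice at every index (objective: faster, constant-factor).
-- Pre_ excludes oword = "" with nonempty text, where A's while loop never advances (diverges).


-- ===== PORT A =====
-- hide_vowel: build `out` left to right, '*' for characters whose lowercase is a vowel
def pvHideVowel (w : List Char) : List Char :=
  w.foldl (fun out c =>
    out ++ [if PySem.Chars.isIn [PySem.Chars.lowerChar c] ['a','e','i','o','u'] then '*' else c]) []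

-- A's while loop: index k, accumulator out_text; the fuel only bounds the iterations (inside
-- Pre_ the loop makes at most text.length steps, so the fuel below is never exhausted)
def pvLoopA (text ow : List Char) : Nat → Nat → List Char → List Char
  | 0, _, out => out
  | fuel+1, k, out =>
    if h : k < text.length then
      if PySem.Chars.lower (PySem.List.slice text (some (k:Int)) (some ((k:Int) + ow.length))) =
         PySem.Chars.lower ow then
        pvLoopA text ow fuel (k + ow.length)
          (out ++ pvHideVowel (PySem.List.slice text (some (k:Int)) (some ((k:Int) + ow.length))))
      else
        pvLoopA text ow fuel (k + 1) (out ++ [text[k]])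
    else out

def less_offensive (text : String) (oword : String) : String :=
  String.ofList (pvLoopA text.toList oword.toList (text.toList.length + 1) 0 [])

-- ===== PORT B =====
-- ''.join('*' if c in 'aeiouAEIOU' else c for c in chunk)
def pvCensor (cs : List Char) : List Char :=
  cs.map (fun c => if PySem.Chars.isIn [c] ['a','e','i','o','u','A','E','I','O','U'] then '*' else c)

-- B's while loop: jump with lt.find(lw, i); out is the concatenation of the appended pieces
def pvLoopB (text lt lw : List Char) : Nat → Nat → List Char → List Char
  | 0, _, out => out
  | fuel+1, i, out =>
    let j := PySem.Chars.findFrom lt lw (i : Int) none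
    if j = -1 then
      out ++ PySem.List.slice text (some (i : Int)) none
    else
      pvLoopB text lt lw fuel (j.toNat + lw.length)
        (out ++ PySem.List.slice text (some (i : Int)) (some j)
             ++ pvCensor (PySem.List.slice text (some j) (some (j + lw.length))))

def less_offensive_alt (text : String) (oword : String) : String :=
  let lw := PySem.Chars.lower oword.toList
  if lw = [] then text
  else String.ofList (pvLoopB text.toList (PySem.Chars.lower text.toList) lw (text.toList.length + 1) 0 [])

-- ===== PRECONDITION & SPEC =====
-- Pre_ excludes exactly oword = "" with text ≠ "", the only inputs on which A never returns:
-- its while loop advances by len(oword) = 0 after the (always-true) empty match and diverges.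
def Pre_less_offensive (text : String) (oword : String) : Prop := oword ≠ "" ∨ text = ""
instance (text : String) (oword : String) : Decidable (Pre_less_offensive text oword) := by
  unfold Pre_less_offensive; infer_instance

def pvWitness_less_offensive : String × String := ("aA bA!", "ba")

def Spec_less_offensive (text : String) (oword : String) (out : String) : Prop := out = less_offensive_alt text oword
instance (text : String) (oword : String) (out : String) : Decidable (Spec_less_offensive text oword out) := by unfold Spec_less_offensive; infer_instance

-- ===== CLAIM (what is proved, stated in full; the proofs are below) =====
def Claim_equal_less_offensive : Prop := ∀ (text : String) (oword : String), Dom_less_offensive text oword → Pre_less_offensive text oword → Spec_less_offensive text oword (less_offensive text oword)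

-- ===== LEMMAS AND PROOFS =====

lemma pv_isIn_singleton (x : Char) (l : List Char) : PySem.Chars.isIn [x] l = true ↔ x ∈ l := by
  rw [PySem.Chars.isIn_iff_infix]
  constructor
  · rintro ⟨s, t, h⟩
    subst h; simp
  · intro h
    obtain ⟨s, t, rfl⟩ := List.append_of_mem h
    exact ⟨s, t, by simp⟩

lemma pv_back (x : Char) (n : ℕ) (h : x.toNat = n) : x = Char.ofNat n := by
  rw [← h, Char.ofNat_toNat]

lemma pv_mem_low (x : Char) : x ∈ (['a','e','i','o','u'] : List Char) ↔
    (x.toNat = 97 ∨ x.toNat = 101 ∨ x.toNat = 105 ∨ x.toNat = 111 ∨ x.toNat = 117) := by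
  simp only [List.mem_cons, List.not_mem_nil, or_false]
  constructor
  · rintro (rfl | rfl | rfl | rfl | rfl) <;> simp
  · rintro (h | h | h | h | h) <;>
      [exact Or.inl (by rw [pv_back x _ h]);
       exact Or.inr (Or.inl (by rw [pv_back x _ h]));
       exact Or.inr (Or.inr (Or.inl (by rw [pv_back x _ h])));
       exact Or.inr (Or.inr (Or.inr (Or.inl (by rw [pv_back x _ h]))));
       exact Or.inr (Or.inr (Or.inr (Or.inr (by rw [pv_back x _ h]))))]

lemma pv_mem_big (x : Char) : x ∈ (['a','e','i','o','u','A','E','I','O','U'] : List Char) ↔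
    (x.toNat = 97 ∨ x.toNat = 101 ∨ x.toNat = 105 ∨ x.toNat = 111 ∨ x.toNat = 117 ∨
     x.toNat = 65 ∨ x.toNat = 69 ∨ x.toNat = 73 ∨ x.toNat = 79 ∨ x.toNat = 85) := by
  simp only [List.mem_cons, List.not_mem_nil, or_false]
  constructor
  · rintro (rfl | rfl | rfl | rfl | rfl | rfl | rfl | rfl | rfl | rfl) <;> simp
  · rintro (h | h | h | h | h | h | h | h | h | h) <;> rw [pv_back x _ h] <;> decide

lemma pv_charLe (a b : Char) : a ≤ b ↔ a.toNat ≤ b.toNat := by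
  rw [Char.le_def, UInt32.le_iff_toNat_le]
  rw [Char.toNat_val, Char.toNat_val]

lemma pv_isupper_iff (c : Char) : PySem.Chars.isupper c = true ↔ 65 ≤ c.toNat ∧ c.toNat ≤ 90 := by
  simp only [PySem.Chars.isupper, Bool.and_eq_true, decide_eq_true_eq, pv_charLe]
  exact Iff.rfl

-- the two per-character vowel tests agree: lowercasing first and checking 'aeiou'
-- is checking membership in 'aeiouAEIOU'
lemma pv_char_key (c : Char) : PySem.Chars.lowerChar c ∈ (['a','e','i','o','u'] : List Char) ↔
    c ∈ (['a','e','i','o','u','A','E','I','O','U'] : List Char) := by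
  unfold PySem.Chars.lowerChar
  by_cases hu : PySem.Chars.isupper c = true
  · rw [if_pos hu]
    have hb := (pv_isupper_iff c).mp hu
    have hv : (Char.ofNat (c.toNat + 32)).toNat = c.toNat + 32 := by
      rw [Char.toNat_ofNat, if_pos]
      exact Or.inl (by omega)
    rw [pv_mem_low, pv_mem_big, hv]
    omega
  · rw [if_neg hu]
    have hb : ¬ (65 ≤ c.toNat ∧ c.toNat ≤ 90) := fun h => hu ((pv_isupper_iff c).mpr h)
    rw [pv_mem_low, pv_mem_big]
    omega

lemma pv_char_eq (c : Char) :
    (if PySem.Chars.isIn [PySem.Chars.lowerChar c] ['a','e','i','o','u'] then '*' else c) =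
    (if PySem.Chars.isIn [c] ['a','e','i','o','u','A','E','I','O','U'] then '*' else c) := by
  have key := pv_char_key c
  by_cases h : PySem.Chars.isIn [PySem.Chars.lowerChar c] ['a','e','i','o','u'] = true
  · rw [if_pos h, if_pos ((pv_isIn_singleton _ _).mpr (key.mp ((pv_isIn_singleton _ _).mp h)))]
  · rw [if_neg h, if_neg (fun h2 => h ((pv_isIn_singleton _ _).mpr (key.mpr ((pv_isIn_singleton _ _).mp h2))))]

lemma pv_hide_eq_censor (w : List Char) : pvHideVowel w = pvCensor w := by
  unfold pvHideVowel pvCensor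
  rw [PySem.List.foldl_append_singleton_eq_map]
  simp only [List.nil_append]
  exact List.map_congr_left (fun c _ => pv_char_eq c)

lemma pv_len_lower (l : List Char) : (PySem.Chars.lower l).length = l.length := by
  simp [PySem.Chars.lower]

-- A's match test at index k is exactly "lowered oword is a prefix of the lowered text from k"
lemma pv_cond_iff (text ow : List Char) (k : Nat) :
    (PySem.Chars.lower (PySem.List.slice text (some (k:Int)) (some ((k:Int) + ow.length))) =
      PySem.Chars.lower ow) ↔
    PySem.Chars.lower ow <+: (PySem.Chars.lower text).drop k := by
  have hcast : ((k:Int) + ow.length) = (((k + ow.length : Nat)) : Int) := by push_cast; ring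
  rw [hcast, PySem.List.slice_natCast]
  have h1 : k + ow.length - k = ow.length := by omega
  rw [h1]
  have h2 : PySem.Chars.lower (List.take ow.length (List.drop k text)) =
      List.take ow.length (List.drop k (PySem.Chars.lower text)) := by
    simp [PySem.Chars.lower, List.map_take, List.map_drop]
  rw [h2, List.prefix_iff_eq_take, pv_len_lower]
  exact ⟨fun h => h.symm, fun h => h.symm⟩

-- through a match-free region A copies characters one by one
lemma pv_loopA_copy (text ow : List Char) :
    ∀ d i out fa, i + d ≤ text.length →
      (∀ m, i ≤ m → m < i + d → ¬ PySem.Chars.lower ow <+: (PySem.Chars.lower text).drop m) →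
      text.length - i < fa →
      pvLoopA text ow fa i out = pvLoopA text ow (fa - d) (i + d) (out ++ (text.drop i).take d) := by
  intro d
  induction d with
  | zero => intro i out fa _ _ _; simp
  | succ d IH =>
    intro i out fa hlen hnm hfa
    have hi : i < text.length := by omega
    obtain ⟨m, rfl⟩ : ∃ m, fa = m + 1 := ⟨fa - 1, by omega⟩
    have hcond : ¬ (PySem.Chars.lower (PySem.List.slice text (some (i:Int)) (some ((i:Int) + ow.length))) =
        PySem.Chars.lower ow) := by
      rw [pv_cond_iff]
      exact hnm i (le_refl i) (by omega)
    simp only [pvLoopA, dif_pos hi, if_neg hcond]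
    rw [IH (i+1) (out ++ [text[i]]) m (by omega)
        (fun mm h1 h2 => hnm mm (by omega) (by omega)) (by omega)]
    congr 1
    · omega
    · omega
    · rw [List.append_assoc]
      congr 1
      rw [List.drop_eq_getElem_cons hi, List.take_succ_cons]
      simp

-- the main loop equivalence: from any position, A's scan and B's find-jump produce the same text
lemma pv_loops_eq (text ow : List Char) (hn : ow ≠ []) :
    ∀ k i out fa fb, i ≤ text.length → text.length - i = k → k < fa → k < fb →
      pvLoopA text ow fa i out =
      pvLoopB text (PySem.Chars.lower text) (PySem.Chars.lower ow) fb i out := by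
  intro k
  induction k using Nat.strong_induction_on with
  | _ k IH =>
    intro i out fa fb hile hk ha hb
    have hltlen : (PySem.Chars.lower text).length = text.length := pv_len_lower text
    have hlwlen : (PySem.Chars.lower ow).length = ow.length := pv_len_lower ow
    have hn1 : 1 ≤ ow.length := List.length_pos_of_ne_nil hn
    have hile' : i ≤ (PySem.Chars.lower text).length := by omega
    obtain ⟨mb, rfl⟩ : ∃ m, fb = m + 1 := ⟨fb - 1, by omega⟩
    by_cases hj : PySem.Chars.findFrom (PySem.Chars.lower text) (PySem.Chars.lower ow) (i:Int) none = -1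
    · -- no further occurrence: A copies the rest character by character, B appends text[i:]
      have hninf : ¬ PySem.Chars.lower ow <:+: (PySem.Chars.lower text).drop i :=
        (PySem.Chars.findFrom_natCast_eq_neg_one_iff _ _ i hile').mp hj
      have hnm : ∀ m, i ≤ m → m < i + (text.length - i) →
          ¬ PySem.Chars.lower ow <+: (PySem.Chars.lower text).drop m := by
        intro m him _ hpre
        apply hninf
        have hdd : (PySem.Chars.lower text).drop m = ((PySem.Chars.lower text).drop i).drop (m - i) := by
          rw [List.drop_drop]; congr 1; omega
        rw [hdd] at hpre
        exact hpre.isInfix.trans (List.drop_suffix _ _).isInfix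
      rw [pv_loopA_copy text ow (text.length - i) i out fa (by omega) hnm (by omega)]
      have hipd : i + (text.length - i) = text.length := by omega
      rw [hipd]
      have htake : (text.drop i).take (text.length - i) = text.drop i :=
        List.take_of_length_le (by simp)
      obtain ⟨ma, hma⟩ : ∃ m, fa - (text.length - i) = m + 1 := ⟨fa - (text.length - i) - 1, by omega⟩
      rw [hma, htake]
      simp only [pvLoopA, pvLoopB]
      rw [dif_neg (lt_irrefl text.length), if_pos hj,
        PySem.List.slice_from text (Int.natCast_nonneg i)]
      simp
    · -- an occurrence at j = find(lw, i): A copies up to j, both censor the chunk and continue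
      obtain ⟨hij, hpre, hmin⟩ := PySem.Chars.findFrom_natCast_spec _ _ i hile' hj
      have hj0 : (0:Int) ≤ PySem.Chars.findFrom (PySem.Chars.lower text) (PySem.Chars.lower ow) (i:Int) none :=
        le_trans (Int.natCast_nonneg i) hij
      set jn := (PySem.Chars.findFrom (PySem.Chars.lower text) (PySem.Chars.lower ow) (i:Int) none).toNat with hjn
      have hijn : i ≤ jn := by omega
      have hjlen : jn + ow.length ≤ text.length := by
        have h2 := hpre.length_le
        rw [List.length_drop, hlwlen, hltlen] at h2
        omega
      have hjnlt : jn < text.length := by omega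
      have hnm : ∀ m, i ≤ m → m < i + (jn - i) →
          ¬ PySem.Chars.lower ow <+: (PySem.Chars.lower text).drop m :=
        fun m h1 h2 => hmin m h1 (by omega)
      rw [pv_loopA_copy text ow (jn - i) i out fa (by omega) hnm (by omega)]
      have hipd : i + (jn - i) = jn := by omega
      rw [hipd]
      obtain ⟨ma, hma⟩ : ∃ m, fa - (jn - i) = m + 1 := ⟨fa - (jn - i) - 1, by omega⟩
      rw [hma]
      have hcond : PySem.Chars.lower (PySem.List.slice text (some (jn:Int)) (some ((jn:Int) + ow.length))) =
          PySem.Chars.lower ow := (pv_cond_iff text ow jn).mpr hpre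
      simp only [pvLoopA, pvLoopB]
      rw [dif_pos hjnlt, if_pos hcond, if_neg hj]
      have hjcast : PySem.Chars.findFrom (PySem.Chars.lower text) (PySem.Chars.lower ow) (i:Int) none
          = ((jn : Nat) : Int) := (Int.toNat_of_nonneg hj0).symm
      have hs1 : PySem.List.slice text (some (i:Int))
          (some (PySem.Chars.findFrom (PySem.Chars.lower text) (PySem.Chars.lower ow) (i:Int) none)) =
          (text.drop i).take (jn - i) := by
        rw [hjcast, PySem.List.slice_natCast]
      have hs2 : PySem.List.slice text
          (some (PySem.Chars.findFrom (PySem.Chars.lower text) (PySem.Chars.lower ow) (i:Int) none))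
          (some (PySem.Chars.findFrom (PySem.Chars.lower text) (PySem.Chars.lower ow) (i:Int) none
            + (PySem.Chars.lower ow).length)) = (text.drop jn).take ow.length := by
        rw [hjcast]
        have hc2 : ((jn:Int) + ((PySem.Chars.lower ow).length : Int)) = ((jn + ow.length : Nat) : Int) := by
          rw [hlwlen]; push_cast; ring
        rw [hc2, PySem.List.slice_natCast]
        congr 1
        omega
      have hs3 : PySem.List.slice text (some (jn:Int)) (some ((jn:Int) + ow.length)) =
          (text.drop jn).take ow.length := by
        have hc3 : ((jn:Int) + (ow.length : Int)) = ((jn + ow.length : Nat) : Int) := by push_cast; ring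
        rw [hc3, PySem.List.slice_natCast]
        congr 1
        omega
      rw [hs1, hs2, hs3, pv_hide_eq_censor, hlwlen]
      rw [List.append_assoc]
      exact IH (text.length - (jn + ow.length)) (by omega) (jn + ow.length) _ ma mb
        (by omega) rfl (by omega) (by omega)

-- ===== VERDICT (by name: the statement is the Claim_ definition above) =====
theorem less_offensive_spec : Claim_equal_less_offensive := by
  intro text ow hdom hpre
  unfold Spec_less_offensive
  by_cases how : ow = ""
  · subst how
    rcases hpre with h | h
    · exact absurd rfl h
    · subst h; decide
  · have hlist : ow.toList ≠ [] := fun h => how (String.toList_eq_nil_iff.mp h)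
    have hlw : PySem.Chars.lower ow.toList ≠ [] := by
      simp [PySem.Chars.lower, hlist]
    unfold less_offensive less_offensive_alt
    show String.ofList (pvLoopA text.toList ow.toList (text.toList.length + 1) 0 []) =
      if PySem.Chars.lower ow.toList = [] then text
      else String.ofList (pvLoopB text.toList (PySem.Chars.lower text.toList)
        (PySem.Chars.lower ow.toList) (text.toList.length + 1) 0 [])
    rw [if_neg hlw]
    exact congrArg String.ofList
      (pv_loops_eq text.toList ow.toList hlist text.toList.length 0 []
        (text.toList.length + 1) (text.toList.length + 1) (by omega) (by omega) (by omega) (by omega))
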